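-- pv_equiv track=rewrite | github.com/afrojuju1/spreads | src/spreads/services/opportunity_replay.py | _horizon_band
-- ===== SOURCE A (Python) =====
-- HORIZON_BANDS = (
--     ("same_day", 0, 0, "daily"),
--     ("next_daily", 1, 2, "daily"),
--     ("near_term", 3, 12, "weekly"),
--     ("post_event", 13, 20, "post_event"),
--     ("swing", 21, 45, "weekly"),
--     ("carry", 46, 120, "monthly"),
-- )
--
-- def _horizon_band(days_to_expiration: int | None) -> tuple[str, int, int, str]:
--     if days_to_expiration is None:
--         return ("near_term", 3, 12, "weekly")
--     for band, lower, upper, expiration_type in HORIZON_BANDS: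
--         if lower <= days_to_expiration <= upper:
--             return band, lower, upper, expiration_type
--     if days_to_expiration < 0:
--         return ("same_day", 0, 0, "daily")
--     return ("carry", 46, max(days_to_expiration, 46), "monthly")
-- ===== SOURCE B (Python) =====
-- # B: compute the band INDEX arithmetically by counting band start thresholds <= d,
-- # then do a single table lookup (no sequential range checks).
-- _BANDS = (
--     ("same_day", 0, 0, "daily"),
--     ("next_daily", 1, 2, "daily"),
--     ("near_term", 3, 12, "weekly"),
--     ("post_event", 13, 20, "post_event"),
--     ("swing", 21, 45, "weekly"),
--     ("carry", 46, 120, "monthly"),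
-- )
-- _STARTS = (1, 3, 13, 21, 46)
--
-- def _horizon_band(days_to_expiration):
--     if days_to_expiration is None:
--         return _BANDS[2]
--     d = days_to_expiration
--     if d < 0:
--         return _BANDS[0]
--     idx = sum(1 for t in _STARTS if t <= d)
--     band, lower, upper, expiration_type = _BANDS[idx]
--     if idx == 5 and d > 120:
--         upper = d
--     return (band, lower, upper, expiration_type)
-- ===== Notes on version B (the rewrite author's own statement) =====
-- stated objective: alternative
-- what changed: Instead of scanning (lower, upper) ranges sequentially, B computes the band index arithmetically by counting start thresholds <= d and does one table lookup, extending the last band's upper bound to d when d > 120.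
import Mathlib
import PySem

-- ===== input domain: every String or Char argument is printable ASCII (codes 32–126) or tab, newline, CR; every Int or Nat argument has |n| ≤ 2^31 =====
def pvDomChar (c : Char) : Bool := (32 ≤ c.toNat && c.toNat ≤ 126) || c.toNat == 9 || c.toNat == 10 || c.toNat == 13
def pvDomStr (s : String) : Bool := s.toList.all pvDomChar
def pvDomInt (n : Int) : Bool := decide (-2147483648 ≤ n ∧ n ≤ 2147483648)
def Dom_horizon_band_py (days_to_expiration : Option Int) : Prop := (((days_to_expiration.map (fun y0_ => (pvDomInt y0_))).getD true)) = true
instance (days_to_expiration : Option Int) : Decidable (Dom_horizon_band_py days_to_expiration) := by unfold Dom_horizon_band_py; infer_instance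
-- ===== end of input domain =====

-- B replaces A's sequential range scan with an arithmetic band-index (count of start thresholds <= d) and one table lookup; objective: alternative.


-- ===== PORT A =====
def HORIZON_BANDS : List (String × Int × Int × String) :=
  [("same_day", 0, 0, "daily"),
   ("next_daily", 1, 2, "daily"),
   ("near_term", 3, 12, "weekly"),
   ("post_event", 13, 20, "post_event"),
   ("swing", 21, 45, "weekly"),
   ("carry", 46, 120, "monthly")]

-- the 'for band, lower, upper, expiration_type in HORIZON_BANDS: if … return' loop
def horizonLoop (d : Int) : List (String × Int × Int × String) → Option (String × Int × Int × String)
  | [] => none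
  | (band, lower, upper, et) :: rest =>
      if lower ≤ d ∧ d ≤ upper then some (band, lower, upper, et) else horizonLoop d rest

def horizon_band_py (days_to_expiration : Option Int) : String × Int × Int × String :=
  match days_to_expiration with
  | none => ("near_term", 3, 12, "weekly")
  | some d =>
    match horizonLoop d HORIZON_BANDS with
    | some r => r
    | none =>
      if d < 0 then ("same_day", 0, 0, "daily")
      else ("carry", 46, max d 46, "monthly")

-- ===== PORT B =====
def altBANDS : List (String × Int × Int × String) :=
  [("same_day", 0, 0, "daily"),
   ("next_daily", 1, 2, "daily"),
   ("near_term", 3, 12, "weekly"),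
   ("post_event", 13, 20, "post_event"),
   ("swing", 21, 45, "weekly"),
   ("carry", 46, 120, "monthly")]

def altSTARTS : List Int := [1, 3, 13, 21, 46]

def horizon_band_py_alt (days_to_expiration : Option Int) : String × Int × Int × String :=
  match days_to_expiration with
  | none => altBANDS.getD 2 ("", 0, 0, "")
  | some d =>
    if d < 0 then altBANDS.getD 0 ("", 0, 0, "")
    else
      let idx := altSTARTS.foldl (fun acc t => if t ≤ d then acc + 1 else acc) 0
      let (band, lower, upper, et) := altBANDS.getD idx ("", 0, 0, "")
      if idx = 5 ∧ d > 120 then (band, lower, d, et) else (band, lower, upper, et)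

-- ===== PRECONDITION & SPEC =====
def Spec_horizon_band_py (days_to_expiration : Option Int) (out : String × Int × Int × String) : Prop := out = horizon_band_py_alt days_to_expiration
instance (days_to_expiration : Option Int) (out : String × Int × Int × String) : Decidable (Spec_horizon_band_py days_to_expiration out) := by unfold Spec_horizon_band_py; infer_instance

-- ===== CLAIM =====
def Claim_equal_horizon_band_py : Prop := ∀ (days_to_expiration : Option Int), Dom_horizon_band_py days_to_expiration → Spec_horizon_band_py days_to_expiration (horizon_band_py days_to_expiration)

-- ===== LEMMAS AND PROOFS =====

-- ===== VERDICT =====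
set_option maxHeartbeats 2000000 in
theorem horizon_band_py_spec : Claim_equal_horizon_band_py := by
  intro d _
  unfold Spec_horizon_band_py horizon_band_py horizon_band_py_alt
  cases d with
  | none => rfl
  | some d =>
    simp only [HORIZON_BANDS, altBANDS, altSTARTS, horizonLoop, List.foldl]
    split_ifs <;>
      first
        | rfl
        | (exfalso; omega)
        | (simp only [List.getD, List.getElem?_cons_zero, List.getElem?_cons_succ,
            Option.getD_some, Prod.mk.injEq, true_and, and_true]
           omega)
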